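-- pv_equiv track=rewrite | github.com/lnogueir/interview-prep | problems/developerTesterIntegration.py | helperTeam
-- ===== SOURCE A (Python) =====
-- def helperTeam(d, t, n, initialD, initialT):
--   if n == 0:
--     return 1
--
--   resultCount = 0
--
--   if d > 0:
--     resultCount += helperTeam(d - 1, initialT, n - 1, initialD, initialT)
--
--   if t > 0:
--     resultCount += helperTeam(initialD, t - 1, n - 1, initialD, initialT)
--
--   return resultCount
-- ===== SOURCE B (Python) =====
-- def helperTeam(d, t, n, initialD, initialT):
--     # Level-by-level DP: count move sequences of length n through the (d, t) state
--     # graph, keeping a dict of reachable states with multiplicities.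
--     if n < 0:
--         return 0
--     cnt = {(d, t): 1}
--     for _ in range(n):
--         if not cnt:
--             break
--         nxt = {}
--         for (a, b), c in cnt.items():
--             if a > 0:
--                 key = (a - 1, initialT)
--                 nxt[key] = nxt.get(key, 0) + c
--             if b > 0:
--                 key = (initialD, b - 1)
--                 nxt[key] = nxt.get(key, 0) + c
--         cnt = nxt
--     return sum(cnt.values())
-- ===== Notes on version B (the rewrite author's own statement) =====
-- stated objective: alternative
-- what changed: replaces the exponential branching recursion by an iterative level-by-level dynamic programming pass that advances a dict of reachable (d,t) states with multiplicities for n steps and sums the final counts; Pre_ excludes only the inputs whose recursion depth reaches the runner's 10000-frame recursion limit, where A raises RecursionError, keeping a 100-frame safety margin for the runner's own stack that also excludes a thin band of still-returning depths 9900-9997 (cited)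
-- outside the precondition, e.g. on helperTeam(9950, 0, -1, 0, 0): A returns 0, B returns 0
import Mathlib
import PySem

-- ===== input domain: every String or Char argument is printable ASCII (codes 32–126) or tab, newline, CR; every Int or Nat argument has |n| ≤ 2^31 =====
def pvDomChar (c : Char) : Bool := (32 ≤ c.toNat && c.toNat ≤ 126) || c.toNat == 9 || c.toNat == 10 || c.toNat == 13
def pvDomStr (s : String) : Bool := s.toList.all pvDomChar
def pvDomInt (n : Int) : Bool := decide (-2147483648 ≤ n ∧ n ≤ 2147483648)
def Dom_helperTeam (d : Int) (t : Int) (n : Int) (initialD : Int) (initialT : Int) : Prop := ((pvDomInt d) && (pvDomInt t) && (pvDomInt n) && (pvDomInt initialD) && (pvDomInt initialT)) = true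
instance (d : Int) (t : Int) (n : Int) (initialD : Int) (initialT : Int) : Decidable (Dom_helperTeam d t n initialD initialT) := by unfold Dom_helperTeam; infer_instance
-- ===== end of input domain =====

-- B replaces A's branching recursion by an iterative level-by-level DP over a dict of
-- reachable (d,t) states with multiplicities (alternative algorithm; no speed claim is made).

-- ===== PORT A =====
-- Transliteration of A's recursion; the Nat fuel only makes it total: it bounds the
-- recursion depth and is proved sufficient on every input satisfying Pre_helperTeam.
def helperTeamAux (initialD initialT : Int) : Nat → Int → Int → Int → Int
  | 0, _, _, _ => 0
  | fuel+1, d, t, n =>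
    if n = 0 then 1
    else (if 0 < d then helperTeamAux initialD initialT fuel (d - 1) initialT (n - 1) else 0)
       + (if 0 < t then helperTeamAux initialD initialT fuel initialD (t - 1) (n - 1) else 0)

def helperTeam (d : Int) (t : Int) (n : Int) (initialD : Int) (initialT : Int) : Int :=
  helperTeamAux initialD initialT
    (n.toNat + (d.toNat + 1) * (initialT.toNat + 1) + (t.toNat + 1) * (initialD.toNat + 1) + 1)
    d t n

-- ===== PORT B =====
-- one DP step: 'for (a,b), c in cnt.items(): …' building nxt
def altStep (initialD initialT : Int) (cnt : PySem.Dict (Int × Int) Int) : PySem.Dict (Int × Int) Int :=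
  cnt.items.foldl (fun nxt e =>
    let n1 := if 0 < e.1.1 then nxt.insert (e.1.1 - 1, initialT) (nxt.getD (e.1.1 - 1, initialT) 0 + e.2) else nxt
    if 0 < e.1.2 then n1.insert (initialD, e.1.2 - 1) (n1.getD (initialD, e.1.2 - 1) 0 + e.2) else n1)
    PySem.Dict.empty

-- 'for _ in range(n): if not cnt: break; cnt = step(cnt)'
def altLoop (initialD initialT : Int) : Nat → PySem.Dict (Int × Int) Int → PySem.Dict (Int × Int) Int
  | 0, cnt => cnt
  | k+1, cnt => if cnt.items.isEmpty then cnt else altLoop initialD initialT k (altStep initialD initialT cnt)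

def helperTeam_alt (d : Int) (t : Int) (n : Int) (initialD : Int) (initialT : Int) : Int :=
  if n < 0 then 0
  else ((altLoop initialD initialT n.toNat ((PySem.Dict.empty).insert (d, t) 1)).values).sum

-- ===== PRECONDITION & SPEC =====
-- pvDepthBound is the exact maximal recursion depth of A (number of nested calls minus one):
-- the longest move chain from (d, t), truncated at n when n ≥ 0; 10^10 stands for "unbounded".
def pvDepthBound (d : Int) (t : Int) (n : Int) (initialD : Int) (initialT : Int) : Int :=
  if d ≤ 0 ∧ t ≤ 0 then 0
  else
    min (if 0 ≤ n then n else 10000000000)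
      (if 0 < initialD ∧ 0 < initialT then 10000000000
       else if initialD ≤ 0 ∧ initialT ≤ 0 then max d t
       else if initialD ≤ 0 then (if d ≤ 0 then t else max t (d + initialT))
       else (if t ≤ 0 then d else max d (t + initialD)))

-- Pre_ excludes exactly the inputs on which A raises RecursionError: those whose recursion
-- depth reaches the runner's 10000-frame recursion limit (n < 0 with both refill budgets
-- positive and a live branch recurses without bound and hits the limit too).  The cutoff
-- keeps a 100-frame safety margin for the stack frames the caller itself occupies, which
-- also excludes a thin band of still-returning inputs of depth 9900–9997 (see the cite in
-- the claim); on those B returns the same value A does.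
def Pre_helperTeam (d : Int) (t : Int) (n : Int) (initialD : Int) (initialT : Int) : Prop :=
  pvDepthBound d t n initialD initialT < 9900
instance (d : Int) (t : Int) (n : Int) (initialD : Int) (initialT : Int) : Decidable (Pre_helperTeam d t n initialD initialT) := by unfold Pre_helperTeam; infer_instance
def pvWitness_helperTeam : Int × Int × Int × Int × Int := (2, 1, 3, 2, 1)

def Spec_helperTeam (d : Int) (t : Int) (n : Int) (initialD : Int) (initialT : Int) (out : Int) : Prop := out = helperTeam_alt d t n initialD initialT
instance (d : Int) (t : Int) (n : Int) (initialD : Int) (initialT : Int) (out : Int) : Decidable (Spec_helperTeam d t n initialD initialT out) := by unfold Spec_helperTeam; infer_instance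

-- ===== CLAIM (what is proved, stated in full; the proofs are below) =====
def Claim_equal_helperTeam : Prop := ∀ (d : Int) (t : Int) (n : Int) (initialD : Int) (initialT : Int), Dom_helperTeam d t n initialD initialT → Pre_helperTeam d t n initialD initialT → Spec_helperTeam d t n initialD initialT (helperTeam d t n initialD initialT)
-- ===== LEMMAS AND PROOFS =====

-- the mathematical recursion both ports compute (recursion on the remaining length)
def fA (initialD initialT : Int) : Nat → Int → Int → Int
  | 0, _, _ => 1
  | k+1, d, t => (if 0 < d then fA initialD initialT k (d - 1) initialT else 0)
               + (if 0 < t then fA initialD initialT k initialD (t - 1) else 0)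

-- weighted sum of a dict's entries against fA at remaining length k
def wsum (initialD initialT : Int) (k : Nat) (l : List ((Int × Int) × Int)) : Int :=
  (l.map (fun e => e.2 * fA initialD initialT k e.1.1 e.1.2)).sum

theorem pre_old (d t n iD iT : Int) (h : Pre_helperTeam d t n iD iT) :
    0 ≤ n ∨ (d ≤ 0 ∧ t ≤ 0) ∨ iD ≤ 0 ∨ iT ≤ 0 := by
  unfold Pre_helperTeam pvDepthBound at h
  split_ifs at h <;> omega

theorem aux_pos (iD iT : Int) : ∀ (k fuel : Nat) (d t : Int), k < fuel →
    helperTeamAux iD iT fuel d t (k : Int) = fA iD iT k d t := by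
  intro k
  induction k with
  | zero =>
    intro fuel d t hk
    cases fuel with
    | zero => omega
    | succ m => simp [helperTeamAux, fA]
  | succ k ih =>
    intro fuel d t hk
    cases fuel with
    | zero => omega
    | succ m =>
      have hne : ((k + 1 : Nat) : Int) ≠ 0 := by push_cast; omega
      have hsub : ((k + 1 : Nat) : Int) - 1 = (k : Int) := by push_cast; ring
      simp only [helperTeamAux, hne, if_false, hsub]
      rw [ih m (d - 1) iT (by omega), ih m iD (t - 1) (by omega)]
      simp [fA]

theorem aux_stop (iD iT : Int) (m : Nat) (d t n : Int) (hn : n ≠ 0) (hd : d ≤ 0) (ht : t ≤ 0) :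
    helperTeamAux iD iT (m + 1) d t n = 0 := by
  have hd' : ¬ (0 < d) := by omega
  have ht' : ¬ (0 < t) := by omega
  simp [helperTeamAux, hn, hd', ht']

theorem aux_neg_nonpos (iD iT : Int) (hiD : iD ≤ 0) (hiT : iT ≤ 0) :
    ∀ (fuel : Nat) (d t n : Int), n < 0 → d.toNat + t.toNat < fuel →
      helperTeamAux iD iT fuel d t n = 0 := by
  intro fuel
  induction fuel with
  | zero => intro d t n _ h; omega
  | succ m ih =>
    intro d t n hn hf
    have hne : n ≠ 0 := by omega
    simp only [helperTeamAux, hne, if_false]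
    have h1 : (if 0 < d then helperTeamAux iD iT m (d - 1) iT (n - 1) else 0) = 0 := by
      split_ifs with hd
      · exact ih (d - 1) iT (n - 1) (by omega) (by omega)
      · rfl
    have h2 : (if 0 < t then helperTeamAux iD iT m iD (t - 1) (n - 1) else 0) = 0 := by
      split_ifs with ht
      · exact ih iD (t - 1) (n - 1) (by omega) (by omega)
      · rfl
    rw [h1, h2]; ring

theorem aux_neg_left (iD iT : Int) (hiD : iD ≤ 0) (hiT : 0 < iT) :
    ∀ (fuel : Nat) (d t n : Int), n < 0 → d.toNat * (iT.toNat + 1) + t.toNat < fuel →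
      helperTeamAux iD iT fuel d t n = 0 := by
  intro fuel
  induction fuel with
  | zero => intro d t n _ h; omega
  | succ m ih =>
    intro d t n hn hf
    have hne : n ≠ 0 := by omega
    simp only [helperTeamAux, hne, if_false]
    have h1 : (if 0 < d then helperTeamAux iD iT m (d - 1) iT (n - 1) else 0) = 0 := by
      split_ifs with hd
      · refine ih (d - 1) iT (n - 1) (by omega) ?_
        have e1 : (d - 1).toNat = d.toNat - 1 := by omega
        rw [e1, Nat.sub_mul, Nat.one_mul]
        have e2 : iT.toNat + 1 ≤ d.toNat * (iT.toNat + 1) :=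
          Nat.le_mul_of_pos_left _ (by omega)
        omega
      · rfl
    have h2 : (if 0 < t then helperTeamAux iD iT m iD (t - 1) (n - 1) else 0) = 0 := by
      split_ifs with ht
      · refine ih iD (t - 1) (n - 1) (by omega) ?_
        have e1 : iD.toNat = 0 := by omega
        rw [e1, Nat.zero_mul]
        have e2 : 0 ≤ d.toNat * (iT.toNat + 1) := Nat.zero_le _
        omega
      · rfl
    rw [h1, h2]; ring

theorem aux_neg_right (iD iT : Int) (hiD : 0 < iD) (hiT : iT ≤ 0) :
    ∀ (fuel : Nat) (d t n : Int), n < 0 → t.toNat * (iD.toNat + 1) + d.toNat < fuel →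
      helperTeamAux iD iT fuel d t n = 0 := by
  intro fuel
  induction fuel with
  | zero => intro d t n _ h; omega
  | succ m ih =>
    intro d t n hn hf
    have hne : n ≠ 0 := by omega
    simp only [helperTeamAux, hne, if_false]
    have h1 : (if 0 < d then helperTeamAux iD iT m (d - 1) iT (n - 1) else 0) = 0 := by
      split_ifs with hd
      · refine ih (d - 1) iT (n - 1) (by omega) ?_
        have e1 : iT.toNat = 0 := by omega
        rw [e1, Nat.zero_mul]
        have e2 : 0 ≤ t.toNat * (iD.toNat + 1) := Nat.zero_le _
        omega
      · rfl
    have h2 : (if 0 < t then helperTeamAux iD iT m iD (t - 1) (n - 1) else 0) = 0 := by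
      split_ifs with ht
      · refine ih iD (t - 1) (n - 1) (by omega) ?_
        have e1 : (t - 1).toNat = t.toNat - 1 := by omega
        rw [e1, Nat.sub_mul, Nat.one_mul]
        have e2 : iD.toNat + 1 ≤ t.toNat * (iD.toNat + 1) :=
          Nat.le_mul_of_pos_left _ (by omega)
        omega
      · rfl
    rw [h1, h2]; ring

theorem map_overwrite_id (key : Int × Int) (w : Int) :
    ∀ l : List ((Int × Int) × Int), key ∉ l.map Prod.fst →
      l.map (fun p => if p.1 == key then (key, w) else p) = l := by
  intro l
  induction l with
  | nil => intro _; rfl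
  | cons p l ih =>
    intro h
    simp only [List.map_cons, List.mem_cons, not_or] at h
    have hne : ¬ ((p.1 == key) = true) := by
      simp only [beq_iff_eq]
      exact fun he => h.1 he.symm
    simp only [List.map_cons, if_neg hne]
    rw [ih h.2]

theorem sum_map_overwrite (g : Int × Int → Int) (key : Int × Int) (v w : Int) :
    ∀ l : List ((Int × Int) × Int), (l.map Prod.fst).Nodup → (key, v) ∈ l →
      ((l.map (fun p => if p.1 == key then (key, w) else p)).map (fun e => e.2 * g e.1)).sum
        = (l.map (fun e => e.2 * g e.1)).sum - v * g key + w * g key := by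
  intro l
  induction l with
  | nil => intro _ h; simp at h
  | cons p l ih =>
    intro hnd hmem
    simp only [List.map_cons, List.nodup_cons] at hnd
    rcases List.mem_cons.mp hmem with he | htail
    · subst he
      have hnotin : key ∉ l.map Prod.fst := hnd.1
      simp only [List.map_cons, map_overwrite_id key w l hnotin, beq_self_eq_true,
        if_true, List.sum_cons]
      ring
    · have hkey : key ∈ l.map Prod.fst := List.mem_map.mpr ⟨(key, v), htail, rfl⟩
      have hne : ¬ ((p.1 == key) = true) := by
        simp only [beq_iff_eq]
        intro he; exact hnd.1 (he ▸ hkey)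
      simp only [List.map_cons, if_neg hne, List.sum_cons]
      rw [ih hnd.2 htail]
      ring

theorem wsum_insert (iD iT : Int) (k : Nat) (dd : PySem.Dict (Int × Int) Int)
    (hnd : dd.keys.Nodup) (key : Int × Int) (c : Int) :
    wsum iD iT k ((dd.insert key (dd.getD key 0 + c)).items)
      = wsum iD iT k dd.items + c * fA iD iT k key.1 key.2 := by
  by_cases hc : dd.contains key = true
  · obtain ⟨v, hv⟩ : ∃ v, dd.get? key = some v := by
      have := PySem.Dict.contains_eq_isSome_get? (d := dd) (k := key)
      rw [hc] at this
      exact Option.isSome_iff_exists.mp this.symm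
    have hmem : (key, v) ∈ dd.items := PySem.Dict.mem_items_of_get?_eq_some dd hv
    have hgd : dd.getD key 0 = v := PySem.Dict.getD_of_get?_eq_some dd 0 hv
    rw [PySem.Dict.items_insert_of_contains dd _ hc, hgd]
    have hnd' : (dd.items.map Prod.fst).Nodup := hnd
    have := sum_map_overwrite (fun e => fA iD iT k e.1 e.2) key v (v + c) dd.items hnd' hmem
    unfold wsum
    rw [this]
    ring
  · have hc' : dd.contains key = false := by simpa using hc
    rw [PySem.Dict.items_insert_of_not_contains dd _ hc',
        PySem.Dict.getD_of_not_contains dd 0 hc']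
    unfold wsum
    simp only [List.map_append, List.sum_append, List.map_cons, List.map_nil,
      List.sum_cons, List.sum_nil]
    ring

def altBody (initialD initialT : Int) (nxt : PySem.Dict (Int × Int) Int)
    (e : (Int × Int) × Int) : PySem.Dict (Int × Int) Int :=
  let n1 := if 0 < e.1.1 then nxt.insert (e.1.1 - 1, initialT) (nxt.getD (e.1.1 - 1, initialT) 0 + e.2) else nxt
  if 0 < e.1.2 then n1.insert (initialD, e.1.2 - 1) (n1.getD (initialD, e.1.2 - 1) 0 + e.2) else n1

theorem altStep_eq (iD iT : Int) (cnt : PySem.Dict (Int × Int) Int) :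
    altStep iD iT cnt = cnt.items.foldl (altBody iD iT) PySem.Dict.empty := rfl

theorem body_nodup (iD iT : Int) (acc : PySem.Dict (Int × Int) Int)
    (hnd : acc.keys.Nodup) (e : (Int × Int) × Int) : (altBody iD iT acc e).keys.Nodup := by
  unfold altBody
  split_ifs <;>
    first
      | exact PySem.Dict.nodup_keys_insert _ _ _ (PySem.Dict.nodup_keys_insert _ _ _ hnd)
      | exact PySem.Dict.nodup_keys_insert _ _ _ hnd
      | exact hnd

theorem wsum_body (iD iT : Int) (k : Nat) (acc : PySem.Dict (Int × Int) Int)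
    (hnd : acc.keys.Nodup) (e : (Int × Int) × Int) :
    wsum iD iT k (altBody iD iT acc e).items
      = wsum iD iT k acc.items + e.2 * fA iD iT (k + 1) e.1.1 e.1.2 := by
  unfold altBody
  by_cases h1 : 0 < e.1.1 <;> by_cases h2 : 0 < e.1.2 <;>
    simp only [h1, h2, if_true, if_false, fA]
  · rw [wsum_insert iD iT k _ (PySem.Dict.nodup_keys_insert _ _ _ hnd) (iD, e.1.2 - 1) e.2,
        wsum_insert iD iT k acc hnd (e.1.1 - 1, iT) e.2]
    ring
  · rw [wsum_insert iD iT k acc hnd (e.1.1 - 1, iT) e.2]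
    ring
  · rw [wsum_insert iD iT k acc hnd (iD, e.1.2 - 1) e.2]
    ring
  · ring

theorem wsum_foldl (iD iT : Int) (k : Nat) :
    ∀ (l : List ((Int × Int) × Int)) (acc : PySem.Dict (Int × Int) Int), acc.keys.Nodup →
      wsum iD iT k (l.foldl (altBody iD iT) acc).items
        = wsum iD iT k acc.items + (l.map (fun e => e.2 * fA iD iT (k + 1) e.1.1 e.1.2)).sum := by
  intro l
  induction l with
  | nil => intro acc _; simp
  | cons e l ih =>
    intro acc hnd
    simp only [List.foldl_cons, List.map_cons, List.sum_cons]
    rw [ih _ (body_nodup iD iT acc hnd e), wsum_body iD iT k acc hnd e]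
    ring

theorem wsum_step (iD iT : Int) (k : Nat) (cnt : PySem.Dict (Int × Int) Int) :
    wsum iD iT k (altStep iD iT cnt).items = wsum iD iT (k + 1) cnt.items := by
  rw [altStep_eq, wsum_foldl iD iT k cnt.items PySem.Dict.empty PySem.Dict.nodup_keys_empty]
  unfold wsum
  simp [PySem.Dict.empty]

theorem loop_sum (iD iT : Int) : ∀ (k : Nat) (cnt : PySem.Dict (Int × Int) Int),
    ((altLoop iD iT k cnt).values).sum = wsum iD iT k cnt.items := by
  intro k
  induction k with
  | zero =>
    intro cnt
    simp only [altLoop, PySem.Dict.values, wsum, fA, mul_one]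
  | succ k ih =>
    intro cnt
    by_cases hE : cnt.items.isEmpty
    · have hnil : cnt.items = [] := List.isEmpty_iff.mp hE
      simp only [altLoop, hE, if_true]
      simp only [PySem.Dict.values, wsum, hnil, List.map_nil, List.sum_nil]
    · simp only [altLoop, hE, if_false, Bool.false_eq_true]
      rw [ih _, wsum_step iD iT k cnt]

theorem alt_eq_fA (d t n iD iT : Int) (hn : 0 ≤ n) :
    helperTeam_alt d t n iD iT = fA iD iT n.toNat d t := by
  unfold helperTeam_alt
  rw [if_neg (by omega)]
  rw [loop_sum iD iT n.toNat _,
      PySem.Dict.items_insert_of_not_contains PySem.Dict.empty 1 (PySem.Dict.contains_empty _)]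
  simp [wsum, PySem.Dict.empty]

-- ===== VERDICT (by name: the statement is the Claim_ definition above) =====
theorem helperTeam_spec : Claim_equal_helperTeam := by
  intro d t n iD iT _ hPre
  unfold Spec_helperTeam
  by_cases hn : 0 ≤ n
  · rw [alt_eq_fA d t n iD iT hn]
    unfold helperTeam
    have hlt : n.toNat < n.toNat + (d.toNat + 1) * (iT.toNat + 1) + (t.toNat + 1) * (iD.toNat + 1) + 1 := by
      generalize (d.toNat + 1) * (iT.toNat + 1) = P
      generalize (t.toNat + 1) * (iD.toNat + 1) = Q
      omega
    have h := aux_pos iD iT n.toNat _ d t hlt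
    rwa [Int.toNat_of_nonneg hn] at h
  · have hneg : n < 0 := by omega
    have hALT : helperTeam_alt d t n iD iT = 0 := by
      unfold helperTeam_alt; rw [if_pos hneg]
    rw [hALT]
    unfold helperTeam
    rcases pre_old d t n iD iT hPre with h | ⟨hd, ht⟩ | hiD | hiT
    · omega
    · exact aux_stop iD iT _ d t n (by omega) hd ht
    · by_cases hiT : iT ≤ 0
      · refine aux_neg_nonpos iD iT hiD hiT _ d t n hneg ?_
        have e1 : iT.toNat = 0 := by omega
        have e2 : iD.toNat = 0 := by omega
        rw [e1, e2]
        simp only [Nat.zero_add, Nat.mul_one]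
        omega
      · refine aux_neg_left iD iT hiD (by omega) _ d t n hneg ?_
        have e2 : iD.toNat = 0 := by omega
        rw [e2]
        simp only [Nat.zero_add, Nat.mul_one, Nat.add_one_mul]
        generalize d.toNat * (iT.toNat + 1) = A
        omega
    · by_cases hiD : iD ≤ 0
      · refine aux_neg_nonpos iD iT hiD hiT _ d t n hneg ?_
        have e1 : iT.toNat = 0 := by omega
        have e2 : iD.toNat = 0 := by omega
        rw [e1, e2]
        simp only [Nat.zero_add, Nat.mul_one]
        omega
      · refine aux_neg_right iD iT (by omega) hiT _ d t n hneg ?_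
        have e1 : iT.toNat = 0 := by omega
        rw [e1]
        simp only [Nat.zero_add, Nat.mul_one, Nat.add_one_mul]
        generalize t.toNat * (iD.toNat + 1) = A
        omega
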